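-- pv_equiv track=rewrite | github.com/zmielko/CtrlF-TF | src/ctrlf_tf/compile_utils.py | merge_kmers
-- ===== SOURCE A (Python) =====
-- from typing import Iterable, List
--
-- def merge_kmers(kmer_idxs: Iterable[int], kmer_dict: dict) -> str:
--     """Projects k-mers onto a single string."""
--     kmer_list = [kmer_dict[i] for i in kmer_idxs]
--     consensus_sequence = ""
--     for idx, letter in enumerate(kmer_list[0]):
--         addition = '.'
--         if letter != '.':
--             addition = letter
--         else:
--             for kmer in kmer_list[1:]:
--                 if kmer[idx] != '.':
--                     addition = kmer[idx]
--                     break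
--         consensus_sequence += addition
--     return consensus_sequence
-- ===== SOURCE B (Python) =====
-- def merge_kmers(kmer_idxs, kmer_dict):
--     """Projects k-mers onto a single string (sequential overlay)."""
--     kmer_list = [kmer_dict[i] for i in kmer_idxs]
--     result = list(kmer_list[0])
--     for kmer in kmer_list[1:]:
--         for idx in range(len(result)):
--             if result[idx] == '.' and kmer[idx] != '.':
--                 result[idx] = kmer[idx]
--     return ''.join(result)
-- ===== Notes on version B (the rewrite author's own statement) =====
-- stated objective: alternative
-- what changed: A builds the consensus column by column, scanning the remaining k-mers with an early break for each '.' position; B instead overlays the k-mers sequentially onto a mutable character list of the first k-mer, filling only positions still equal to '.'.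
import Mathlib
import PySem

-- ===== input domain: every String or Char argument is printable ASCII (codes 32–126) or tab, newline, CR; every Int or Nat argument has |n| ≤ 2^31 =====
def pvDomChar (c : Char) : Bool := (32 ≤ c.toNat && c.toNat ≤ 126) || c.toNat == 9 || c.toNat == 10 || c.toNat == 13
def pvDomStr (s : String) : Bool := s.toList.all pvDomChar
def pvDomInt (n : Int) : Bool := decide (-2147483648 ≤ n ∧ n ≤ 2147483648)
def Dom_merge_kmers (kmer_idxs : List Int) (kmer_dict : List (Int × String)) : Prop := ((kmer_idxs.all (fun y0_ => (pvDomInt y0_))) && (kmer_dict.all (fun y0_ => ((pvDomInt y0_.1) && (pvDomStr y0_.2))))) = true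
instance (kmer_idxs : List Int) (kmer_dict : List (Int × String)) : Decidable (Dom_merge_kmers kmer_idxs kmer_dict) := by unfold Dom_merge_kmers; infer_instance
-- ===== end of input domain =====

-- B replaces A's column-major scan with early break by a k-mer-major sequential overlay
-- into a mutable character list; same cost, different decomposition ("alternative").

-- ===== PORT A =====
-- inner loop: 'for kmer in kmer_list[1:]: if kmer[idx] != '.': addition = kmer[idx]; break'
-- (kmer[idx] out of range is an IndexError in Python — excluded by Pre_; the '.' default here scans on)
def mergeA_scan (idx : Int) : List String → Char
  | [] => '.'
  | k :: ks =>
    let c := (PySem.Str.pyGet? k idx).getD '.'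
    if c ≠ '.' then c else mergeA_scan idx ks

def merge_kmers (kmer_idxs : List Int) (kmer_dict : List (Int × String)) : String :=
  -- kmer_list = [kmer_dict[i] for i in kmer_idxs]  (a missing key = KeyError, excluded by Pre_)
  let kmer_list : List String := kmer_idxs.map (fun i => ((PySem.Dict.mk kmer_dict).get? i).getD "")
  -- for idx, letter in enumerate(kmer_list[0]): … consensus += addition
  -- (kmer_list[0] on an empty list = IndexError, excluded by Pre_)
  let consensus := (PySem.List.enumerate (kmer_list.headD "").toList 0).foldl
    (fun acc p => acc ++ [if p.2 ≠ '.' then p.2 else mergeA_scan p.1 (kmer_list.drop 1)]) []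
  String.ofList consensus

-- ===== PORT B =====
-- 'for idx in range(len(result)): if result[idx] == '.' and kmer[idx] != '.': result[idx] = kmer[idx]'
-- (kmer[idx] out of range is an IndexError in Python — excluded by Pre_; the '.' default here skips the index)
def mergeB_fill (res : List Char) (k : String) : List Char :=
  (PySem.List.pyRange 0 (res.length : Int) 1).foldl
    (fun r idx =>
      if PySem.List.pyGetD r idx '.' = '.' ∧ (PySem.Str.pyGet? k idx).getD '.' ≠ '.' then
        PySem.List.pySetD r idx ((PySem.Str.pyGet? k idx).getD '.')
      else r) res

def merge_kmers_alt (kmer_idxs : List Int) (kmer_dict : List (Int × String)) : String :=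
  let kmer_list : List String := kmer_idxs.map (fun i => ((PySem.Dict.mk kmer_dict).get? i).getD "")
  let result := (kmer_list.headD "").toList        -- result = list(kmer_list[0])
  String.ofList ((kmer_list.drop 1).foldl mergeB_fill result)

-- ===== PRECONDITION & SPEC =====
-- 'and' short-circuit scan of A's inner loop stays in range: used only to state Pre_ (not by either port)
def pvScanOK (idx : Nat) : List String → Bool
  | [] => true
  | k :: ks =>
    decide (idx < k.toList.length) &&
      (if k.toList.getD idx '.' = '.' then pvScanOK idx ks else true)

-- Pre_ = exactly the inputs where Python A returns: kmer_idxs nonempty (else IndexError), every index a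
-- key of kmer_dict (else KeyError), and each '.'-column scan of the remaining k-mers stays in range
-- until its first non-'.' character (else IndexError).
def Pre_merge_kmers (kmer_idxs : List Int) (kmer_dict : List (Int × String)) : Prop :=
  kmer_idxs ≠ [] ∧
  (∀ i ∈ kmer_idxs, ((PySem.Dict.mk kmer_dict).get? i).isSome) ∧
  (∀ j < (((kmer_idxs.map (fun i => ((PySem.Dict.mk kmer_dict).get? i).getD "")).headD "").toList).length,
     (((kmer_idxs.map (fun i => ((PySem.Dict.mk kmer_dict).get? i).getD "")).headD "").toList).getD j '.' = '.' →
     pvScanOK j ((kmer_idxs.map (fun i => ((PySem.Dict.mk kmer_dict).get? i).getD "")).drop 1) = true)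
instance (kmer_idxs : List Int) (kmer_dict : List (Int × String)) : Decidable (Pre_merge_kmers kmer_idxs kmer_dict) := by
  unfold Pre_merge_kmers; infer_instance

def pvWitness_merge_kmers : List Int × (List (Int × String)) := ([0, 1], [(0, ".A."), (1, "C..")])

def Spec_merge_kmers (kmer_idxs : List Int) (kmer_dict : List (Int × String)) (out : String) : Prop := out = merge_kmers_alt kmer_idxs kmer_dict
instance (kmer_idxs : List Int) (kmer_dict : List (Int × String)) (out : String) : Decidable (Spec_merge_kmers kmer_idxs kmer_dict out) := by unfold Spec_merge_kmers; infer_instance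

-- ===== CLAIM (what is proved, stated in full; the proofs are below) =====
def Claim_equal_merge_kmers : Prop := ∀ (kmer_idxs : List Int) (kmer_dict : List (Int × String)), Dom_merge_kmers kmer_idxs kmer_dict → Pre_merge_kmers kmer_idxs kmer_dict → Spec_merge_kmers kmer_idxs kmer_dict (merge_kmers kmer_idxs kmer_dict)

-- ===== LEMMAS AND PROOFS =====

-- column value both programs compute: first non-'.' character at column j, '.'-defaulted
def scanN (j : Nat) : List (List Char) → Char
  | [] => '.'
  | k :: ks => let c := k.getD j '.'; if c ≠ '.' then c else scanN j ks

theorem mergeA_scan_natCast (j : Nat) (ks : List String) :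
    mergeA_scan (j : Int) ks = scanN j (ks.map String.toList) := by
  induction ks with
  | nil => rfl
  | cons k ks ih =>
    simp only [mergeA_scan, scanN, List.map_cons, PySem.Str.pyGet?_natCast, ih,
      List.getD_eq_getElem?_getD]

theorem getD_set_ne {α : Type} (xs : List α) (i j : Nat) (v d : α) (h : i ≠ j) :
    (xs.set i v).getD j d = xs.getD j d := by
  simp [List.getD_eq_getElem?_getD, List.getElem?_set_ne h]

theorem getD_set_self {α : Type} (xs : List α) (j : Nat) (v d : α) (h : j < xs.length) :
    (xs.set j v).getD j d = v := by
  simp [List.getD_eq_getElem?_getD, List.getElem?_set_self h]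

theorem pySetD_natCast {α : Type} (xs : List α) (n : Nat) (v : α) :
    PySem.List.pySetD xs (n : Int) v = xs.set n v := by
  by_cases h : n < xs.length
  · rw [PySem.List.pySetD, PySem.List.pySet?_natCast xs n v h, Option.getD_some]
  · have : PySem.List.pySet? xs (n : Int) v = none := by
      rw [PySem.List.pySet?_eq_none_iff, PySem.Raise.InRange]
      omega
    rw [PySem.List.pySetD, this, Option.getD_none, List.set_eq_of_length_le (by omega)]

-- the overlay loop of B, one k-mer, first m positions (proof-side model of mergeB_fill)
def fillN (res k : List Char) : Nat → List Char
  | 0 => res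
  | m + 1 =>
    let r := fillN res k m
    if r.getD m '.' = '.' ∧ k.getD m '.' ≠ '.' then r.set m (k.getD m '.') else r

theorem mergeB_fill_eq (res : List Char) (k : String) :
    mergeB_fill res k = fillN res k.toList res.length := by
  rw [mergeB_fill]
  rw [show ((res.length : Int)) = ((res.length : Nat) : Int) from rfl, PySem.List.pyRange_zero_nat,
    List.foldl_map]
  generalize res.length = m
  induction m with
  | zero => rfl
  | succ m ih =>
    rw [List.range_succ, List.foldl_append, ih, List.foldl_cons, List.foldl_nil, fillN]
    simp only [PySem.List.pyGetD_natCast, PySem.Str.pyGet?_natCast, pySetD_natCast,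
      List.getD_eq_getElem?_getD]

theorem fillN_length (res k : List Char) (m : Nat) : (fillN res k m).length = res.length := by
  induction m with
  | zero => rfl
  | succ m ih => rw [fillN]; split <;> simp [ih]

theorem fillN_getD_ge (res k : List Char) (m j : Nat) (h : m ≤ j) :
    (fillN res k m).getD j '.' = res.getD j '.' := by
  induction m with
  | zero => rfl
  | succ m ih =>
    rw [fillN]
    have hne : m ≠ j := by omega
    split
    · simp only [List.getD_eq_getElem?_getD, List.getElem?_set_ne hne]
      exact ih (by omega)
    · exact ih (by omega)

theorem fillN_getD_lt (res k : List Char) (m j : Nat) (hj : j < m) (hlen : j < res.length) :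
    (fillN res k m).getD j '.' =
      if res.getD j '.' = '.' ∧ k.getD j '.' ≠ '.' then k.getD j '.' else res.getD j '.' := by
  induction m with
  | zero => omega
  | succ m ih =>
    rw [fillN]
    by_cases hjm : j < m
    · have hne : m ≠ j := by omega
      split
      · rw [getD_set_ne _ _ _ _ _ hne]; exact ih hjm
      · exact ih hjm
    · have hj' : j = m := by omega
      subst hj'
      rw [fillN_getD_ge res k j j (le_refl j)]
      split
      · exact getD_set_self _ _ _ _ (by rw [fillN_length]; exact hlen)
      · exact fillN_getD_ge res k j j (le_refl j)

theorem foldl_fill_length (rest : List String) (res : List Char) :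
    (rest.foldl mergeB_fill res).length = res.length := by
  induction rest generalizing res with
  | nil => rfl
  | cons k ks ih =>
    rw [List.foldl_cons, ih, mergeB_fill_eq, fillN_length]

theorem foldl_fill_getD (rest : List String) (res : List Char) (j : Nat) (hlen : j < res.length) :
    (rest.foldl mergeB_fill res).getD j '.' =
      if res.getD j '.' ≠ '.' then res.getD j '.' else scanN j (rest.map String.toList) := by
  induction rest generalizing res with
  | nil => simp [scanN]
  | cons k ks ih =>
    rw [List.foldl_cons, ih (mergeB_fill res k) (by rw [mergeB_fill_eq, fillN_length]; exact hlen)]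
    rw [mergeB_fill_eq, fillN_getD_lt res k.toList res.length j hlen hlen]
    simp only [List.map_cons, scanN, List.getD_eq_getElem?_getD]
    by_cases h1 : res[j]?.getD '.' = '.' <;> by_cases h2 : k.toList[j]?.getD '.' = '.' <;>
      simp [h1, h2]

theorem merge_kmers_eq_alt (kmer_idxs : List Int) (kmer_dict : List (Int × String)) :
    merge_kmers kmer_idxs kmer_dict = merge_kmers_alt kmer_idxs kmer_dict := by
  rw [merge_kmers, merge_kmers_alt]
  set kmer_list := kmer_idxs.map (fun i => ((PySem.Dict.mk kmer_dict).get? i).getD "") with hkl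
  set first := (kmer_list.headD "").toList with hfirst
  set rest := kmer_list.drop 1 with hrest
  rw [PySem.List.foldl_append_singleton_eq_map, List.nil_append]
  apply congrArg String.ofList
  apply List.ext_getElem
  · rw [List.length_map, PySem.List.length_enumerate, foldl_fill_length]
  · intro j hj1 hj2
    have hjf : j < first.length := by
      rw [List.length_map, PySem.List.length_enumerate] at hj1; exact hj1
    rw [List.getElem_map, PySem.List.getElem_enumerate]
    rw [← List.getD_eq_getElem (rest.foldl mergeB_fill first) '.' hj2,
      foldl_fill_getD rest first j hjf]
    simp only [zero_add, mergeA_scan_natCast, List.getD_eq_getElem first '.' hjf]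

-- ===== VERDICT (by name: the statement is the Claim_ definition above) =====
theorem merge_kmers_spec : Claim_equal_merge_kmers := by
  intro kmer_idxs kmer_dict _ _
  unfold Spec_merge_kmers
  exact merge_kmers_eq_alt kmer_idxs kmer_dict
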